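-- pv_equiv track=rewrite | github.com/hamanpaul/custom-skills | smux-manager-skill/scripts/problemmap-guard.py | pick_expected
-- ===== SOURCE A (Python) =====
-- from typing import Any
--
-- def pick_expected(events: list[dict[str, Any]], worker_id: str, manager_id: str, override: str | None) -> str:
--     if override:
--         return override
--     manager_aliases = {manager_id, "manager", "mgr"}
--     for event in reversed(events):
--         if event.get("from") in manager_aliases and event.get("to") == worker_id:
--             summary = str(event.get("summary", "")).strip()
--             if summary:
--                 return summary
--     for event in events:
--         summary = str(event.get("summary", "")).strip()
--         if summary:
--             return summary
--     return ""
-- ===== SOURCE B (Python) =====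
-- def pick_expected(events, worker_id, manager_id, override):
--     if override:
--         return override
--     manager_aliases = {manager_id, "manager", "mgr"}
--     last_manager = None
--     first_any = None
--     for event in events:
--         summary = str(event.get("summary", "")).strip()
--         if summary:
--             if first_any is None:
--                 first_any = summary
--             if event.get("from") in manager_aliases and event.get("to") == worker_id:
--                 last_manager = summary
--     if last_manager is not None:
--         return last_manager
--     if first_any is not None:
--         return first_any
--     return ""
-- ===== Notes on version B (the rewrite author's own statement) =====
-- stated objective: alternative
-- what changed: Fuses A's reversed manager scan and forward fallback scan into one forward pass maintaining two accumulators (last matching manager summary, first non-empty summary).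
import Mathlib
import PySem

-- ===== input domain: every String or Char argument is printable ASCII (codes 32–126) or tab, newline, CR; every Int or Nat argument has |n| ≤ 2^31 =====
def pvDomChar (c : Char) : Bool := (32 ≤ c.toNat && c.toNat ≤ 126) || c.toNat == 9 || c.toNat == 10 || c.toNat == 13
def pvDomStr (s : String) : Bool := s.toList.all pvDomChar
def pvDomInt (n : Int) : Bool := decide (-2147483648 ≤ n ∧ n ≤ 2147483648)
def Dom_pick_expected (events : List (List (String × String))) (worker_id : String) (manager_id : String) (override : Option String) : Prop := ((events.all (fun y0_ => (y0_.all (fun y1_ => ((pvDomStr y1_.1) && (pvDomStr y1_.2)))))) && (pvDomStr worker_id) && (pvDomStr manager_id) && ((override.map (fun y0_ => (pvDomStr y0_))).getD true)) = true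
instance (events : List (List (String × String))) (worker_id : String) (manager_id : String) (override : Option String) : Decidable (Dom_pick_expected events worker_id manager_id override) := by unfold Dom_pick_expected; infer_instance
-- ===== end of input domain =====

-- B fuses A's reversed manager scan and forward fallback scan into one forward pass with two
-- accumulators (objective: alternative decomposition, same O(n) cost).

-- shared helpers: dict.get via PySem.Dict, str(event.get("summary","")).strip(), and the
-- manager-alias + receiver test both Pythons contain verbatim
def pvGet (e : List (String × String)) (k : String) : Option String :=
  (PySem.Dict.mk e).get? k

def pvSummary (e : List (String × String)) : String :=
  PySem.Str.strip ((pvGet e "summary").getD "")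

def pvIsMgr (aliases : PySem.Set String) (worker_id : String) (e : List (String × String)) : Bool :=
  (match pvGet e "from" with
   | some f => PySem.Set.contains aliases f
   | none => false)
  && (pvGet e "to" == some worker_id)

-- ===== PORT A =====
-- first loop of A: scan (already-reversed) events for a manager→worker event with a non-empty summary
def aLoop1 (aliases : PySem.Set String) (worker_id : String) : List (List (String × String)) → Option String
  | [] => none
  | e :: rest =>
      if pvIsMgr aliases worker_id e then
        let s := pvSummary e
        if s == "" then aLoop1 aliases worker_id rest else some s
      else aLoop1 aliases worker_id rest

-- second loop of A: first non-empty summary, forward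
def aLoop2 : List (List (String × String)) → Option String
  | [] => none
  | e :: rest =>
      let s := pvSummary e
      if s == "" then aLoop2 rest else some s

def aBody (events : List (List (String × String))) (worker_id : String) (manager_id : String) : String :=
  let aliases := PySem.Set.ofList [manager_id, "manager", "mgr"]
  match aLoop1 aliases worker_id events.reverse with
  | some s => s
  | none =>
      match aLoop2 events with
      | some s => s
      | none => ""

def pick_expected (events : List (List (String × String))) (worker_id : String) (manager_id : String) (override : Option String) : String :=
  match override with
  | some o => if o == "" then aBody events worker_id manager_id else o
  | none => aBody events worker_id manager_id

-- ===== PORT B =====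
-- one forward step of B's single pass over (last_manager, first_any)
def bStep (aliases : PySem.Set String) (worker_id : String)
    (st : Option String × Option String) (e : List (String × String)) :
    Option String × Option String :=
  let s := pvSummary e
  if s == "" then st
  else
    let fa := match st.2 with | none => some s | some v => some v
    let lm := if pvIsMgr aliases worker_id e then some s else st.1
    (lm, fa)

def bBody (events : List (List (String × String))) (worker_id : String) (manager_id : String) : String :=
  let aliases := PySem.Set.ofList [manager_id, "manager", "mgr"]
  let st := events.foldl (bStep aliases worker_id) (none, none)
  match st.1 with
  | some s => s
  | none =>
      match st.2 with
      | some s => s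
      | none => ""

def pick_expected_alt (events : List (List (String × String))) (worker_id : String) (manager_id : String) (override : Option String) : String :=
  match override with
  | some o => if o == "" then bBody events worker_id manager_id else o
  | none => bBody events worker_id manager_id

-- ===== PRECONDITION & SPEC =====
def Spec_pick_expected (events : List (List (String × String))) (worker_id : String) (manager_id : String) (override : Option String) (out : String) : Prop := out = pick_expected_alt events worker_id manager_id override
instance (events : List (List (String × String))) (worker_id : String) (manager_id : String) (override : Option String) (out : String) : Decidable (Spec_pick_expected events worker_id manager_id override out) := by unfold Spec_pick_expected; infer_instance

-- ===== CLAIM (what is proved, stated in full; the proofs are below) =====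
def Claim_equal_pick_expected : Prop := ∀ (events : List (List (String × String))) (worker_id : String) (manager_id : String) (override : Option String), Dom_pick_expected events worker_id manager_id override → Spec_pick_expected events worker_id manager_id override (pick_expected events worker_id manager_id override)

-- ===== LEMMAS AND PROOFS =====

lemma aLoop1_append (al : PySem.Set String) (w : String) (xs ys : List (List (String × String))) :
    aLoop1 al w (xs ++ ys) = (aLoop1 al w xs).or (aLoop1 al w ys) := by
  induction xs with
  | nil => simp [aLoop1]
  | cons e rest ih =>
      simp only [List.cons_append, aLoop1]
      by_cases h : pvIsMgr al w e = true
      · simp only [h, if_true]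
        by_cases hs : pvSummary e == ""
        · simp [hs, ih]
        · simp [hs]
      · simp [h, ih]

lemma bFold_invariant (al : PySem.Set String) (w : String)
    (evs : List (List (String × String))) (lm fa : Option String) :
    evs.foldl (bStep al w) (lm, fa) =
      ((aLoop1 al w evs.reverse).or lm, fa.or (aLoop2 evs)) := by
  induction evs generalizing lm fa with
  | nil => simp [aLoop1, aLoop2]
  | cons e rest ih =>
      simp only [List.foldl_cons, List.reverse_cons, aLoop1_append, ih, bStep, aLoop2]
      by_cases hs : pvSummary e == ""
      · simp [hs, aLoop1]
      · by_cases h : pvIsMgr al w e = true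
        · cases fa <;> simp [hs, h, aLoop1]
        · cases fa <;> simp [hs, h, aLoop1]

lemma body_eq (events : List (List (String × String))) (w m : String) :
    aBody events w m = bBody events w m := by
  unfold aBody bBody
  simp only [bFold_invariant, Option.or_none, Option.none_or]

-- ===== VERDICT (by name: the statement is the Claim_ definition above) =====
theorem pick_expected_spec : Claim_equal_pick_expected := by
  intro events w m override _
  unfold Spec_pick_expected pick_expected pick_expected_alt
  cases override with
  | none => exact body_eq events w m
  | some o =>
      by_cases h : o == "" <;> simp [h, body_eq]
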